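-- pv_equiv track=rewrite | github.com/Solus-dot/Alphanus | core/skills.py | _safe_prompt_snippet
-- ===== SOURCE A (Python) =====
-- from typing import Any, Callable, Dict, List, Optional, Tuple
--
-- def _safe_prompt_snippet(body: str, allowed: int) -> str:
--     if allowed <= 0 or not body:
--         return ""
--     if len(body) <= allowed:
--         return body.rstrip()
--
--     kept: List[str] = []
--     used = 0
--     fence_balance = 0
--     for line in body.splitlines():
--         addition = len(line) if not kept else len(line) + 1
--         if used + addition > allowed:
--             break
--         kept.append(line)
--         used += addition
--         if line.lstrip().startswith("```"):
--             fence_balance += 1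
--
--     while kept and fence_balance % 2 == 1:
--         removed = kept.pop()
--         if removed.lstrip().startswith("```"):
--             fence_balance -= 1
--
--     if kept:
--         return "\n".join(kept).rstrip()
--
--     clipped = body[:allowed].rstrip()
--     if clipped.count("```") % 2 == 1:
--         clipped = clipped.rsplit("```", 1)[0].rstrip()
--     return clipped
-- ===== SOURCE B (Python) =====
-- # Same truncation result via one pass that records the last fence-balanced prefix
-- # length instead of popping kept lines afterwards; joins directly from lines[:bl].
-- def _safe_prompt_snippet(body: str, allowed: int) -> str:
--     if allowed <= 0 or not body:
--         return ""
--     if len(body) <= allowed: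
--         return body.rstrip()
--
--     lines = body.splitlines()
--     bl = 0            # number of leading lines at the last even fence balance
--     n = 0             # lines that fit so far
--     used = 0
--     fence_even = True
--     for line in lines:
--         add = len(line) + (1 if n else 0)
--         if used + add > allowed:
--             break
--         used += add
--         n += 1
--         if line.lstrip().startswith("```"):
--             fence_even = not fence_even
--         if fence_even:
--             bl = n
--
--     if bl:
--         return "\n".join(lines[:bl]).rstrip()
--
--     clipped = body[:allowed].rstrip()
--     if clipped.count("```") % 2 == 1:
--         clipped = clipped.rsplit("```", 1)[0].rstrip()
--     return clipped
-- ===== Notes on version B (the rewrite author's own statement) =====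
-- stated objective: simpler
-- what changed: Single pass that records the kept-line count at the last even fence balance (balanced_len) and joins lines[:balanced_len], replacing A's kept-list building plus the trailing pop-until-balanced while-loop.
import Mathlib
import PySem

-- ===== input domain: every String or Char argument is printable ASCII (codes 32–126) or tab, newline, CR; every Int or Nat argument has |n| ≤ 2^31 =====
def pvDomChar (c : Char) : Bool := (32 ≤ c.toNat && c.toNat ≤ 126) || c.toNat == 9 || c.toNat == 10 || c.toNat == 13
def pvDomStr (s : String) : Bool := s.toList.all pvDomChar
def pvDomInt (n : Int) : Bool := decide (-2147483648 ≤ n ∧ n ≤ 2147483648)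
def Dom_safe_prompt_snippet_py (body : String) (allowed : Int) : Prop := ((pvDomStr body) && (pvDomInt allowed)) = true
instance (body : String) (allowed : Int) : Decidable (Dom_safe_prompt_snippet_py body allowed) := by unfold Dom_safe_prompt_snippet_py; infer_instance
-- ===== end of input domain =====

-- B records the kept-line count at the last even fence balance during the single
-- fitting pass and joins lines[:balanced_len], instead of A's building of a kept
-- list followed by a pop-until-balanced while-loop (objective: simpler).

-- ===== PORT A =====
def pvIsFence (line : String) : Bool := PySem.Str.startswith (PySem.Str.lstrip line) "```"

-- exact port of s.rsplit(sub, 1)[0] for nonempty sub (used only with sub = "```")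
def pvRsplit1Head (s sub : String) : String :=
  let i := PySem.Str.rfind s sub
  if i < 0 then s else PySem.Str.slice s none (some i)

def pvALoop (allowed : Int) : List String → List String → Int → Int → List String × Int
  | [], kept, _used, fence => (kept, fence)
  | line :: rest, kept, used, fence =>
    let addition : Int :=
      if kept.isEmpty then (PySem.Str.len line : Int) else (PySem.Str.len line : Int) + 1
    if used + addition > allowed then (kept, fence)
    else
      pvALoop allowed rest (kept ++ [line]) (used + addition)
        (if pvIsFence line then fence + 1 else fence)

-- the while-loop: pops from the end of kept (given reversed) while fence is odd
def pvATrimR : List String → Int → List String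
  | [], _fence => []
  | removed :: rest, fence =>
    if PySem.Int.mod fence 2 == 1 then
      pvATrimR rest (if pvIsFence removed then fence - 1 else fence)
    else removed :: rest

def safe_prompt_snippet_py (body : String) (allowed : Int) : String :=
  if allowed ≤ 0 ∨ body = "" then ""
  else if (PySem.Str.len body : Int) ≤ allowed then PySem.Str.rstrip body
  else
    let res := pvALoop allowed (PySem.Str.splitlines body) [] 0 0
    let kept := (pvATrimR res.1.reverse res.2).reverse
    if kept.isEmpty then
      let clipped := PySem.Str.rstrip (PySem.Str.slice body none (some allowed))
      if PySem.Str.count clipped "```" % 2 == 1 then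
        PySem.Str.rstrip (pvRsplit1Head clipped "```")
      else clipped
    else PySem.Str.rstrip (PySem.Str.join "\n" kept)

-- ===== PORT B =====
def pvBLoop (allowed : Int) : List String → Int → Int → Bool → Int → Int
  | [], _n, _used, _even, bl => bl
  | line :: rest, n, used, even, bl =>
    let add : Int := (PySem.Str.len line : Int) + (if n == 0 then 0 else 1)
    if used + add > allowed then bl
    else
      let even2 :=
        if PySem.Str.startswith (PySem.Str.lstrip line) "```" then !even else even
      pvBLoop allowed rest (n + 1) (used + add) even2 (if even2 then n + 1 else bl)

def safe_prompt_snippet_py_alt (body : String) (allowed : Int) : String :=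
  if allowed ≤ 0 ∨ body = "" then ""
  else if (PySem.Str.len body : Int) ≤ allowed then PySem.Str.rstrip body
  else
    let lines := PySem.Str.splitlines body
    let bl := pvBLoop allowed lines 0 0 true 0
    if bl == 0 then
      let clipped := PySem.Str.rstrip (PySem.Str.slice body none (some allowed))
      if PySem.Str.count clipped "```" % 2 == 1 then
        PySem.Str.rstrip (pvRsplit1Head clipped "```")
      else clipped
    else PySem.Str.rstrip (PySem.Str.join "\n" (PySem.List.slice lines none (some bl)))

-- ===== PRECONDITION & SPEC =====
def Spec_safe_prompt_snippet_py (body : String) (allowed : Int) (out : String) : Prop := out = safe_prompt_snippet_py_alt body allowed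
instance (body : String) (allowed : Int) (out : String) : Decidable (Spec_safe_prompt_snippet_py body allowed out) := by unfold Spec_safe_prompt_snippet_py; infer_instance

-- ===== CLAIM (what is proved, stated in full; the proofs are below) =====
def Claim_equal_safe_prompt_snippet_py : Prop := ∀ (body : String) (allowed : Int), Dom_safe_prompt_snippet_py body allowed → Spec_safe_prompt_snippet_py body allowed (safe_prompt_snippet_py body allowed)

-- ===== LEMMAS AND PROOFS =====

-- number of fence lines
def pvCF (l : List String) : Nat := l.countP (fun s => pvIsFence s)

-- balanced prefix length (largest n with an even fence count among the first n),
-- computed by recursion on the REVERSED kept list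
def pvBlR : List String → Nat
  | [] => 0
  | _x :: rest => if pvCF (_x :: rest) % 2 = 0 then rest.length + 1 else pvBlR rest

theorem pvBlR_le (l : List String) : pvBlR l ≤ l.length := by
  induction l with
  | nil => simp [pvBlR]
  | cons x rest ih =>
    simp only [pvBlR]
    split
    · simp
    · simp only [List.length_cons]; omega

theorem pvTrim_eq (rev : List String) :
    (pvATrimR rev (pvCF rev : Int)).reverse = rev.reverse.take (pvBlR rev) := by
  induction rev with
  | nil => simp [pvATrimR, pvBlR]
  | cons x rest ih =>
    have hmod : (PySem.Int.mod (pvCF (x :: rest) : Int) 2 == 1) = decide (pvCF (x :: rest) % 2 = 1) := by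
      have : PySem.Int.mod (pvCF (x :: rest) : Int) 2 = ((pvCF (x :: rest) % 2 : Nat) : Int) := by
        exact_mod_cast PySem.Int.mod_natCast (pvCF (x :: rest)) 2
      rw [this]
      rcases Nat.mod_two_eq_zero_or_one (pvCF (x :: rest)) with h | h <;> simp [h]
    simp only [pvATrimR, hmod]
    by_cases hpar : pvCF (x :: rest) % 2 = 1
    · -- odd: pop, recurse
      have hf : (if pvIsFence x then (pvCF (x :: rest) : Int) - 1 else (pvCF (x :: rest) : Int))
          = (pvCF rest : Int) := by
        simp only [pvCF, List.countP_cons]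
        by_cases hx : pvIsFence x <;> simp [hx]
      have hbl : pvBlR (x :: rest) = pvBlR rest := by
        simp [pvBlR, hpar]
      rw [if_pos (by simp [hpar]), hf, ih, hbl]
      simp only [List.reverse_cons]
      rw [List.take_append_of_le_length (by simpa using pvBlR_le rest)]
    · -- even: stop
      have hz : pvCF (x :: rest) % 2 = 0 := by omega
      rw [if_neg (by simp [hpar])]
      have hbl : pvBlR (x :: rest) = rest.length + 1 := by simp [pvBlR, hz]
      rw [hbl]
      have : (x :: rest).reverse.length = rest.length + 1 := by simp
      rw [← this, List.take_length]

theorem pvLoop_rel (allowed : Int) (lines : List String) : ∀ (kept : List String) (used : Int),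
    (pvALoop allowed lines kept used (pvCF kept : Int)).2
      = (pvCF (pvALoop allowed lines kept used (pvCF kept : Int)).1 : Int)
    ∧ pvBLoop allowed lines (kept.length : Int) used (decide (pvCF kept % 2 = 0))
        ((pvBlR kept.reverse : Nat) : Int)
      = ((pvBlR (pvALoop allowed lines kept used (pvCF kept : Int)).1.reverse : Nat) : Int)
    ∧ ∃ t, kept ++ lines = (pvALoop allowed lines kept used (pvCF kept : Int)).1 ++ t := by
  induction lines with
  | nil => intro kept used; exact ⟨rfl, rfl, [], by simp [pvALoop]⟩
  | cons line rest ih =>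
    intro kept used
    have haddeq : (if kept.isEmpty then (PySem.Str.len line : Int) else (PySem.Str.len line : Int) + 1)
        = (PySem.Str.len line : Int) + (if ((kept.length : Int) == 0) then 0 else 1) := by
      cases kept with
      | nil => simp
      | cons a l =>
        have h0 : ¬((l.length : Int) + 1 = 0) := by omega
        simp [h0]
    simp only [pvALoop, pvBLoop, ← haddeq]
    by_cases hbrk : used + (if kept.isEmpty then (PySem.Str.len line : Int) else (PySem.Str.len line : Int) + 1) > allowed
    · rw [if_pos hbrk, if_pos hbrk]
      exact ⟨rfl, rfl, line :: rest, by simp⟩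
    · rw [if_neg hbrk, if_neg hbrk]
      -- align the recursive states with kept' = kept ++ [line]
      have hcf : (if pvIsFence line then (pvCF kept : Int) + 1 else (pvCF kept : Int))
          = (pvCF (kept ++ [line]) : Int) := by
        simp only [pvCF, List.countP_append, List.countP_cons, List.countP_nil]
        by_cases hx : pvIsFence line <;> simp [hx]
      have hcf' : pvCF (kept ++ [line]) = pvCF kept + (if pvIsFence line then 1 else 0) := by
        simp only [pvCF, List.countP_append, List.countP_cons, List.countP_nil]
        by_cases hx : pvIsFence line <;> simp [hx]
      have heven : (if PySem.Str.startswith (PySem.Str.lstrip line) "```"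
            then !(decide (pvCF kept % 2 = 0)) else (decide (pvCF kept % 2 = 0)))
          = decide (pvCF (kept ++ [line]) % 2 = 0) := by
        rw [hcf']
        show (if pvIsFence line then _ else _) = _
        by_cases hx : pvIsFence line <;> simp only [hx, if_pos] <;>
          rcases Nat.mod_two_eq_zero_or_one (pvCF kept) with h | h <;> simp [h, Nat.add_mod]
      have hn : (kept.length : Int) + 1 = ((kept ++ [line]).length : Int) := by simp
      have hbl2 : (if decide (pvCF (kept ++ [line]) % 2 = 0) = true
            then (((kept ++ [line]).length : Nat) : Int) else ((pvBlR kept.reverse : Nat) : Int))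
          = ((pvBlR (kept ++ [line]).reverse : Nat) : Int) := by
        have hrev : (kept ++ [line]).reverse = line :: kept.reverse := by simp
        have hcfr : pvCF (line :: kept.reverse) = pvCF (kept ++ [line]) := by
          simp only [pvCF, List.countP_cons, List.countP_append, List.countP_nil,
            List.countP_reverse]
          omega
        rw [hrev]
        simp only [pvBlR, hcfr]
        by_cases h : pvCF (kept ++ [line]) % 2 = 0 <;> simp [h]
      rw [hcf, heven, hn, hbl2]
      obtain ⟨h1, h2, t, h3⟩ := ih (kept ++ [line]) (used + (if kept.isEmpty then (PySem.Str.len line : Int) else (PySem.Str.len line : Int) + 1))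
      refine ⟨h1, h2, t, ?_⟩
      rw [show kept ++ line :: rest = (kept ++ [line]) ++ rest by simp]
      exact h3

-- ===== VERDICT (by name: the statement is the Claim_ definition above) =====
theorem safe_prompt_snippet_py_spec : Claim_equal_safe_prompt_snippet_py := by
  intro body allowed _hdom
  show safe_prompt_snippet_py body allowed = safe_prompt_snippet_py_alt body allowed
  unfold safe_prompt_snippet_py safe_prompt_snippet_py_alt
  by_cases h1 : allowed ≤ 0 ∨ body = ""
  · simp [h1]
  · rw [if_neg h1, if_neg h1]
    by_cases h2 : (PySem.Str.len body : Int) ≤ allowed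
    · rw [if_pos h2, if_pos h2]
    · rw [if_neg h2, if_neg h2]
      dsimp only
      set lines := PySem.Str.splitlines body with hlines
      obtain ⟨hf, hbl, t, hpre⟩ := pvLoop_rel allowed lines [] 0
      simp only [pvCF, List.countP_nil, Nat.cast_zero] at hf hbl hpre
      set keptF := (pvALoop allowed lines [] 0 0).1 with hkept
      -- A's trimmed kept list is keptF.take (pvBlR keptF.reverse)
      have htrim : (pvATrimR keptF.reverse (pvALoop allowed lines [] 0 0).2).reverse
          = keptF.take (pvBlR keptF.reverse) := by
        rw [hf]
        have := pvTrim_eq keptF.reverse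
        rw [show pvCF keptF.reverse = pvCF keptF by simp [pvCF, List.countP_reverse]] at this
        simpa using this
      have hblsimp : pvBLoop allowed lines 0 0 true 0 = ((pvBlR keptF.reverse : Nat) : Int) := by
        simpa [pvBlR] using hbl
      rw [hblsimp, htrim]
      set n := pvBlR keptF.reverse with hn
      have hnle : n ≤ keptF.length := by simpa using pvBlR_le keptF.reverse
      by_cases hz : n = 0
      · simp [hz]
      · rw [if_neg (by
          simp only [List.isEmpty_iff, List.take_eq_nil_iff]
          rintro (h | h)
          · exact hz h
          · rw [h] at hnle; simp at hnle; exact hz hnle)]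
        rw [if_neg (by simpa using hz)]
        -- keptF.take n = lines.take n since keptF is a prefix of lines and n ≤ keptF.length
        have hlt : keptF.take n = PySem.List.slice lines none (some ((n : Nat) : Int)) := by
          rw [PySem.List.slice_to_natCast]
          rw [show lines = keptF ++ t by simpa using hpre,
            List.take_append_of_le_length hnle]
        rw [hlt]
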